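-- pv_equiv track=rewrite | github.com/andcaspe/py-modbus-web-monitor | src/py_modbus_web_monitor/utils/sim_server.py | _parse_addresses
-- ===== SOURCE A (Python) =====
-- def _parse_addresses(raw: str | None, max_count: int) -> list[int]:
--     if not raw:
--         return [0]
--     value = raw.strip().lower()
--     if value == "all":
--         return list(range(max_count))
--     addresses: list[int] = []
--     for chunk in value.split(","):
--         part = chunk.strip()
--         if not part:
--             continue
--         if "-" in part:
--             start_str, end_str = part.split("-", 1)
--             if start_str and end_str:
--                 start = int(start_str)
--                 end = int(end_str)
--                 if start <= end:
--                     addresses.extend(range(start, end + 1))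
--                 else:
--                     addresses.extend(range(end, start + 1))
--         else:
--             addresses.append(int(part))
--     filtered = [addr for addr in addresses if 0 <= addr < max_count]
--     return sorted(set(filtered)) or [0]
-- ===== SOURCE B (Python) =====
-- def _parse_addresses(raw, max_count):
--     if not raw:
--         return [0]
--     value = raw.strip().lower()
--     if value == "all":
--         return list(range(max_count))
--     intervals = []
--     for chunk in value.split(","):
--         part = chunk.strip()
--         if not part:
--             continue
--         if "-" in part:
--             start_str, end_str = part.split("-", 1)
--             if not (start_str and end_str):
--                 continue
--             lo = int(start_str)
--             hi = int(end_str)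
--             if lo > hi:
--                 lo, hi = hi, lo
--         else:
--             lo = hi = int(part)
--         lo = max(lo, 0)
--         hi = min(hi, max_count - 1)
--         if lo <= hi:
--             intervals.append((lo, hi))
--     if not intervals:
--         return [0]
--     intervals.sort()
--     out = []
--     cur = -1
--     for lo, hi in intervals:
--         lo = max(lo, cur + 1)
--         if lo <= hi:
--             out.extend(range(lo, hi + 1))
--             cur = hi
--     return out
-- ===== Notes on version B (the rewrite author's own statement) =====
-- stated objective: alternative
-- what changed: B never expands range tokens into individual addresses: it collects clamped (lo,hi) intervals, sorts the intervals by start, and emits the merged union in one pass, replacing A's expand-everything-then-sorted(set(...)) step.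
import Mathlib
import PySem

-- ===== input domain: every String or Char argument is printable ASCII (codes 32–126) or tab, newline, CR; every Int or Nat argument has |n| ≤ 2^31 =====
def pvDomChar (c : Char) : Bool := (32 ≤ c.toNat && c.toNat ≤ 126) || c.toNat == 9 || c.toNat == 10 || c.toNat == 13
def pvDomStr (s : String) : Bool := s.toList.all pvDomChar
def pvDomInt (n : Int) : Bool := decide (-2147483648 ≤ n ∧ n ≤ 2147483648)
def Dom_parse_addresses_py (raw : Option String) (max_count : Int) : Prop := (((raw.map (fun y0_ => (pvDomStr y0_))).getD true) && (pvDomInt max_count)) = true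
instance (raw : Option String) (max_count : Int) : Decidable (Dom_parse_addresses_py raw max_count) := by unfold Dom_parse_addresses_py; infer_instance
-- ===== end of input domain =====

-- B replaces A's expand-every-address-then-sorted(set(...)) step by clamped (lo,hi) intervals
-- sorted by start and merged in one pass; the output is emitted already sorted and duplicate-free.
-- (Python's local aliases `part`/`value` are inlined in the ports.)

-- ===== PORT A =====
def aStep (acc : List Int) (chunk : String) : List Int :=
  if PySem.Str.strip chunk = "" then acc
  else if PySem.Str.isIn "-" (PySem.Str.strip chunk) then
    match PySem.Str.splitMax? (PySem.Str.strip chunk) "-" 1 with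
    | some [start_str, end_str] =>
      if start_str ≠ "" ∧ end_str ≠ "" then
        match PySem.Int.ofStr? start_str, PySem.Int.ofStr? end_str with
        | some s, some e =>
          if s ≤ e then acc ++ PySem.List.pyRange s (e + 1) 1
          else acc ++ PySem.List.pyRange e (s + 1) 1
        | _, _ => acc  -- int() raises here; excluded by Pre_
      else acc
    | _ => acc  -- unreachable: splitMax? with "-" in part yields exactly two pieces
  else
    match PySem.Int.ofStr? (PySem.Str.strip chunk) with
    | some n => acc ++ [n]
    | none => acc  -- int() raises here; excluded by Pre_

def parse_addresses_py (raw : Option String) (max_count : Int) : List Int :=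
  match raw with
  | none => [0]
  | some r =>
    if r = "" then [0]
    else if PySem.Str.lower (PySem.Str.strip r) = "all" then PySem.List.pyRange 0 max_count 1
    else
      if PySem.List.sorted (PySem.Set.ofList
            ((((PySem.Str.split? (PySem.Str.lower (PySem.Str.strip r)) ",").getD []).foldl aStep []).filter
              (fun a => decide (0 ≤ a ∧ a < max_count)))) (fun x => x) false = []
      then [0]
      else PySem.List.sorted (PySem.Set.ofList
            ((((PySem.Str.split? (PySem.Str.lower (PySem.Str.strip r)) ",").getD []).foldl aStep []).filter
              (fun a => decide (0 ≤ a ∧ a < max_count)))) (fun x => x) false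

-- ===== PORT B =====
-- "lo = max(lo, 0); hi = min(hi, max_count - 1); if lo <= hi: intervals.append((lo, hi))"
def clampAdd (max_count : Int) (acc : List (Int × Int)) (lo hi : Int) : List (Int × Int) :=
  if max lo 0 ≤ min hi (max_count - 1) then acc ++ [(max lo 0, min hi (max_count - 1))] else acc

def bStep (max_count : Int) (acc : List (Int × Int)) (chunk : String) : List (Int × Int) :=
  if PySem.Str.strip chunk = "" then acc
  else if PySem.Str.isIn "-" (PySem.Str.strip chunk) then
    match PySem.Str.splitMax? (PySem.Str.strip chunk) "-" 1 with
    | some [start_str, end_str] =>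
      if start_str ≠ "" ∧ end_str ≠ "" then
        match PySem.Int.ofStr? start_str, PySem.Int.ofStr? end_str with
        | some a, some b =>
          if a > b then clampAdd max_count acc b a else clampAdd max_count acc a b
        | _, _ => acc  -- int() raises here; excluded by Pre_
      else acc
    | _ => acc
  else
    match PySem.Int.ofStr? (PySem.Str.strip chunk) with
    | some n => clampAdd max_count acc n n
    | none => acc  -- int() raises here; excluded by Pre_

-- "lo = max(lo, cur + 1); if lo <= hi: out.extend(range(lo, hi + 1)); cur = hi"
def bMergeStep (st : Int × List Int) (p : Int × Int) : Int × List Int :=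
  if max p.1 (st.1 + 1) ≤ p.2
  then (p.2, st.2 ++ PySem.List.pyRange (max p.1 (st.1 + 1)) (p.2 + 1) 1)
  else st

def parse_addresses_py_alt (raw : Option String) (max_count : Int) : List Int :=
  match raw with
  | none => [0]
  | some r =>
    if r = "" then [0]
    else if PySem.Str.lower (PySem.Str.strip r) = "all" then PySem.List.pyRange 0 max_count 1
    else
      if ((PySem.Str.split? (PySem.Str.lower (PySem.Str.strip r)) ",").getD []).foldl (bStep max_count) [] = []
      then [0]
      else ((PySem.List.sorted
              (((PySem.Str.split? (PySem.Str.lower (PySem.Str.strip r)) ",").getD []).foldl (bStep max_count) [])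
              (fun p => p.1) false).foldl bMergeStep (-1, [])).2

-- ===== PRECONDITION & SPEC =====
-- Pre_ excludes exactly the inputs on which A raises ValueError: a non-empty comma chunk whose
-- int() token(s) do not parse as a Python integer literal.
def chunkOK (chunk : String) : Bool :=
  if PySem.Str.strip chunk = "" then true
  else if PySem.Str.isIn "-" (PySem.Str.strip chunk) then
    match PySem.Str.splitMax? (PySem.Str.strip chunk) "-" 1 with
    | some [start_str, end_str] =>
      if start_str = "" ∨ end_str = "" then true
      else (PySem.Int.ofStr? start_str).isSome && (PySem.Int.ofStr? end_str).isSome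
    | _ => true
  else (PySem.Int.ofStr? (PySem.Str.strip chunk)).isSome

def Pre_parse_addresses_py (raw : Option String) (max_count : Int) : Prop :=
  (match raw with
   | none => true
   | some r =>
     if r = "" then true
     else if PySem.Str.lower (PySem.Str.strip r) = "all" then true
     else ((PySem.Str.split? (PySem.Str.lower (PySem.Str.strip r)) ",").getD []).all chunkOK) = true

instance (raw : Option String) (max_count : Int) : Decidable (Pre_parse_addresses_py raw max_count) := by
  unfold Pre_parse_addresses_py; infer_instance

def pvWitness_parse_addresses_py : Option String × Int := (some "1-3, 7,2", 6)

def Spec_parse_addresses_py (raw : Option String) (max_count : Int) (out : List Int) : Prop := out = parse_addresses_py_alt raw max_count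
instance (raw : Option String) (max_count : Int) (out : List Int) : Decidable (Spec_parse_addresses_py raw max_count out) := by unfold Spec_parse_addresses_py; infer_instance

-- ===== CLAIM (what is proved, stated in full; the proofs are below) =====
def Claim_equal_parse_addresses_py : Prop := ∀ (raw : Option String) (max_count : Int), Dom_parse_addresses_py raw max_count → Pre_parse_addresses_py raw max_count → Spec_parse_addresses_py raw max_count (parse_addresses_py raw max_count)

-- ===== LEMMAS AND PROOFS =====

-- A token expanding to the range [m, M] keeps the invariant: B's interval list covers exactly
-- the in-range part of A's address list, and each interval is non-empty inside [0, mc-1].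
theorem range_case (mc m M : Int) (hmM : m ≤ M) (accA : List Int) (accB : List (Int × Int))
    (hB : ∀ p ∈ accB, 0 ≤ p.1 ∧ p.1 ≤ p.2 ∧ p.2 ≤ mc - 1)
    (hM : ∀ x : Int, (x ∈ accA ∧ 0 ≤ x ∧ x < mc) ↔ ∃ p ∈ accB, p.1 ≤ x ∧ x ≤ p.2) :
    (∀ p ∈ clampAdd mc accB m M, 0 ≤ p.1 ∧ p.1 ≤ p.2 ∧ p.2 ≤ mc - 1) ∧
    (∀ x : Int, (x ∈ accA ++ PySem.List.pyRange m (M + 1) 1 ∧ 0 ≤ x ∧ x < mc) ↔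
      ∃ p ∈ clampAdd mc accB m M, p.1 ≤ x ∧ x ≤ p.2) := by
  unfold clampAdd
  split_ifs with h
  · constructor
    · intro p hp
      rcases List.mem_append.mp hp with h' | h'
      · exact hB p h'
      · rw [List.mem_singleton.mp h']
        refine ⟨le_max_right _ _, h, min_le_right _ _⟩
    · intro x
      simp only [List.mem_append, PySem.List.mem_pyRange_one, List.mem_singleton]
      constructor
      · rintro ⟨hx | hx, hb1, hb2⟩
        · obtain ⟨p, hp, h1, h2⟩ := (hM x).mp ⟨hx, hb1, hb2⟩
          exact ⟨p, Or.inl hp, h1, h2⟩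
        · exact ⟨(max m 0, min M (mc - 1)), Or.inr rfl, by dsimp only; omega, by dsimp only; omega⟩
      · rintro ⟨p, hp | rfl, h1, h2⟩
        · have := (hM x).mpr ⟨p, hp, h1, h2⟩
          exact ⟨Or.inl this.1, this.2⟩
        · dsimp only at h1 h2
          exact ⟨Or.inr (by omega), by omega, by omega⟩
  · refine ⟨hB, fun x => ?_⟩
    simp only [List.mem_append, PySem.List.mem_pyRange_one]
    constructor
    · rintro ⟨hx | hx, hb1, hb2⟩
      · exact (hM x).mp ⟨hx, hb1, hb2⟩
      · exfalso; omega
    · intro hx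
      have := (hM x).mpr hx
      exact ⟨Or.inl this.1, this.2⟩

set_option maxHeartbeats 1000000 in
theorem step_inv (mc : Int) (c : String) (accA : List Int) (accB : List (Int × Int))
    (hc : chunkOK c = true)
    (hB : ∀ p ∈ accB, 0 ≤ p.1 ∧ p.1 ≤ p.2 ∧ p.2 ≤ mc - 1)
    (hM : ∀ x : Int, (x ∈ accA ∧ 0 ≤ x ∧ x < mc) ↔ ∃ p ∈ accB, p.1 ≤ x ∧ x ≤ p.2) :
    (∀ p ∈ bStep mc accB c, 0 ≤ p.1 ∧ p.1 ≤ p.2 ∧ p.2 ≤ mc - 1) ∧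
    (∀ x : Int, (x ∈ aStep accA c ∧ 0 ≤ x ∧ x < mc) ↔ ∃ p ∈ bStep mc accB c, p.1 ≤ x ∧ x ≤ p.2) := by
  unfold aStep bStep
  unfold chunkOK at hc
  by_cases hp : PySem.Str.strip c = ""
  · rw [if_pos hp, if_pos hp]
    exact ⟨hB, hM⟩
  · rw [if_neg hp] at hc
    rw [if_neg hp, if_neg hp]
    by_cases hin : PySem.Str.isIn "-" (PySem.Str.strip c) = true
    · rw [if_pos hin] at hc
      rw [if_pos hin, if_pos hin]
      rcases hsp : PySem.Str.splitMax? (PySem.Str.strip c) "-" 1 with _ | l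
      · exact ⟨hB, hM⟩
      · rcases l with _ | ⟨s, l⟩
        · exact ⟨hB, hM⟩
        · rcases l with _ | ⟨e, l⟩
          · exact ⟨hB, hM⟩
          · rcases l with _ | ⟨t, ts⟩
            · rw [hsp] at hc
              dsimp only at hc ⊢
              by_cases hse : s = "" ∨ e = ""
              · have hse' : ¬ (s ≠ "" ∧ e ≠ "") := by tauto
                rw [if_neg hse', if_neg hse']
                exact ⟨hB, hM⟩
              · push_neg at hse
                have hse' : ¬ (s = "" ∨ e = "") := by tauto
                rw [if_pos hse, if_pos hse]
                rw [if_neg hse'] at hc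
                rw [Bool.and_eq_true] at hc
                obtain ⟨a, ha⟩ := Option.isSome_iff_exists.mp hc.1
                obtain ⟨b, hb⟩ := Option.isSome_iff_exists.mp hc.2
                rw [ha, hb]
                dsimp only
                by_cases hab : a ≤ b
                · rw [if_pos hab, if_neg (by omega : ¬ a > b)]
                  exact range_case mc a b hab accA accB hB hM
                · rw [if_neg hab, if_pos (by omega : a > b)]
                  exact range_case mc b a (by omega) accA accB hB hM
            · exact ⟨hB, hM⟩
    · rw [if_neg hin] at hc
      rw [if_neg hin, if_neg hin]
      obtain ⟨n, hn⟩ := Option.isSome_iff_exists.mp hc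
      rw [hn]
      dsimp only
      have := range_case mc n n le_rfl accA accB hB hM
      rwa [PySem.List.pyRange_one_singleton] at this

theorem parse_loop_inv (mc : Int) (chunks : List String)
    (h : ∀ c ∈ chunks, chunkOK c = true) (accA : List Int) (accB : List (Int × Int))
    (hB : ∀ p ∈ accB, 0 ≤ p.1 ∧ p.1 ≤ p.2 ∧ p.2 ≤ mc - 1)
    (hM : ∀ x : Int, (x ∈ accA ∧ 0 ≤ x ∧ x < mc) ↔ ∃ p ∈ accB, p.1 ≤ x ∧ x ≤ p.2) :
    (∀ p ∈ chunks.foldl (bStep mc) accB, 0 ≤ p.1 ∧ p.1 ≤ p.2 ∧ p.2 ≤ mc - 1) ∧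
    (∀ x : Int, (x ∈ chunks.foldl aStep accA ∧ 0 ≤ x ∧ x < mc) ↔
      ∃ p ∈ chunks.foldl (bStep mc) accB, p.1 ≤ x ∧ x ≤ p.2) := by
  induction chunks generalizing accA accB with
  | nil => exact ⟨hB, hM⟩
  | cons c cs ih =>
    simp only [List.foldl_cons]
    obtain ⟨sB, sM⟩ := step_inv mc c accA accB (h c (List.mem_cons_self ..)) hB hM
    exact ih (fun c' hc' => h c' (List.mem_cons_of_mem _ hc')) _ _ sB sM

-- Invariant of B's merge fold over the start-sorted interval list.
theorem merge_inv (rest : List (Int × Int)) (cur : Int) (out : List Int)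
    (h1 : out.Pairwise (· < ·))
    (h2 : ∀ x ∈ out, x ≤ cur)
    (h3 : ∀ p ∈ rest, 0 ≤ p.1 ∧ p.1 ≤ p.2)
    (h4 : rest.Pairwise (fun p q => p.1 ≤ q.1))
    (h5 : ∀ p ∈ rest, ∀ x : Int, p.1 ≤ x → x ≤ cur → x ∈ out) :
    (rest.foldl bMergeStep (cur, out)).2.Pairwise (· < ·) ∧
    (∀ x ∈ (rest.foldl bMergeStep (cur, out)).2, x ≤ (rest.foldl bMergeStep (cur, out)).1) ∧
    (∀ x : Int, x ∈ (rest.foldl bMergeStep (cur, out)).2 ↔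
      x ∈ out ∨ ∃ p ∈ rest, p.1 ≤ x ∧ x ≤ p.2) := by
  induction rest generalizing cur out with
  | nil => exact ⟨h1, h2, fun x => by simp⟩
  | cons p rest ih =>
    have hp3 := h3 p (List.mem_cons_self ..)
    have h4' := (List.pairwise_cons.mp h4).2
    have h4p := (List.pairwise_cons.mp h4).1
    have h3' := fun q hq => h3 q (List.mem_cons_of_mem _ hq)
    simp only [List.foldl_cons]
    by_cases hstep : max p.1 (cur + 1) ≤ p.2
    · have hred : bMergeStep (cur, out) p =
        (p.2, out ++ PySem.List.pyRange (max p.1 (cur + 1)) (p.2 + 1) 1) := by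
        simp only [bMergeStep, if_pos hstep]
      rw [hred]
      have g1 : (out ++ PySem.List.pyRange (max p.1 (cur + 1)) (p.2 + 1) 1).Pairwise (· < ·) := by
        rw [List.pairwise_append]
        refine ⟨h1, PySem.List.pairwise_lt_pyRange_one _ _, ?_⟩
        intro x hx y hy
        have := h2 x hx
        have := (PySem.List.mem_pyRange_one.mp hy).1
        omega
      have g2 : ∀ x ∈ out ++ PySem.List.pyRange (max p.1 (cur + 1)) (p.2 + 1) 1, x ≤ p.2 := by
        intro x hx
        rcases List.mem_append.mp hx with h' | h'
        · have := h2 x h'; omega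
        · have := (PySem.List.mem_pyRange_one.mp h').2; omega
      have g5 : ∀ q ∈ rest, ∀ x : Int, q.1 ≤ x → x ≤ p.2 →
          x ∈ out ++ PySem.List.pyRange (max p.1 (cur + 1)) (p.2 + 1) 1 := by
        intro q hq x hqx hxp
        by_cases hxlo : max p.1 (cur + 1) ≤ x
        · exact List.mem_append.mpr (Or.inr (PySem.List.mem_pyRange_one.mpr ⟨hxlo, by omega⟩))
        · have hq1 : p.1 ≤ q.1 := h4p q hq
          exact List.mem_append.mpr (Or.inl (h5 p (List.mem_cons_self ..) x (by omega) (by omega)))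
      obtain ⟨H1, H2, H3⟩ := ih p.2 _ g1 g2 h3' h4' g5
      refine ⟨H1, H2, fun x => ?_⟩
      rw [H3 x]
      simp only [List.mem_append, PySem.List.mem_pyRange_one, List.mem_cons]
      constructor
      · rintro ((hx | hx) | ⟨q, hq, hx1, hx2⟩)
        · exact Or.inl hx
        · exact Or.inr ⟨p, Or.inl rfl, by omega, by omega⟩
        · exact Or.inr ⟨q, Or.inr hq, hx1, hx2⟩
      · rintro (hx | ⟨q, rfl | hq, hx1, hx2⟩)
        · exact Or.inl (Or.inl hx)
        · by_cases hxlo : max q.1 (cur + 1) ≤ x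
          · exact Or.inl (Or.inr ⟨hxlo, by omega⟩)
          · exact Or.inl (Or.inl (h5 q (List.mem_cons_self ..) x hx1 (by omega)))
        · exact Or.inr ⟨q, hq, hx1, hx2⟩
    · have hred : bMergeStep (cur, out) p = (cur, out) := by
        simp only [bMergeStep, if_neg hstep]
      rw [hred]
      have g5 : ∀ q ∈ rest, ∀ x : Int, q.1 ≤ x → x ≤ cur → x ∈ out :=
        fun q hq => h5 q (List.mem_cons_of_mem _ hq)
      obtain ⟨H1, H2, H3⟩ := ih cur out h1 h2 h3' h4' g5
      refine ⟨H1, H2, fun x => ?_⟩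
      rw [H3 x]
      simp only [List.mem_cons]
      constructor
      · rintro (hx | ⟨q, hq, hx1, hx2⟩)
        · exact Or.inl hx
        · exact Or.inr ⟨q, Or.inr hq, hx1, hx2⟩
      · rintro (hx | ⟨q, rfl | hq, hx1, hx2⟩)
        · exact Or.inl hx
        · exact Or.inl (h5 q (List.mem_cons_self ..) x hx1 (by omega))
        · exact Or.inr ⟨q, hq, hx1, hx2⟩

-- ===== VERDICT (by name: the statement is the Claim_ definition above) =====
set_option maxHeartbeats 1000000 in
theorem parse_addresses_py_spec : Claim_equal_parse_addresses_py := by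
  unfold Claim_equal_parse_addresses_py Spec_parse_addresses_py
  intro raw mc _ hpre
  cases raw with
  | none => rfl
  | some r =>
    unfold Pre_parse_addresses_py at hpre
    unfold parse_addresses_py parse_addresses_py_alt
    dsimp only at hpre ⊢
    by_cases hr : r = ""
    · rw [if_pos hr, if_pos hr]
    · rw [if_neg hr] at hpre
      rw [if_neg hr, if_neg hr]
      by_cases hall : PySem.Str.lower (PySem.Str.strip r) = "all"
      · rw [if_pos hall, if_pos hall]
      · rw [if_neg hall] at hpre
        rw [if_neg hall, if_neg hall]
        have hok : ∀ c ∈ (PySem.Str.split? (PySem.Str.lower (PySem.Str.strip r)) ",").getD [],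
            chunkOK c = true := List.all_eq_true.mp hpre
        obtain ⟨HB, HM⟩ := parse_loop_inv mc
          ((PySem.Str.split? (PySem.Str.lower (PySem.Str.strip r)) ",").getD []) hok [] []
          (by simp) (by simp)
        set chunks := (PySem.Str.split? (PySem.Str.lower (PySem.Str.strip r)) ",").getD [] with hchunks
        set A := chunks.foldl aStep [] with hA
        set I := chunks.foldl (bStep mc) [] with hI
        have hmemf : ∀ x : Int, x ∈ A.filter (fun a => decide (0 ≤ a ∧ a < mc)) ↔
            ∃ p ∈ I, p.1 ≤ x ∧ x ≤ p.2 := by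
          intro x
          rw [List.mem_filter, ← HM x]
          simp only [decide_eq_true_eq]
        set s := PySem.List.sorted I (fun p => p.1) false with hs
        have hsmem : ∀ p : Int × Int, p ∈ s ↔ p ∈ I :=
          fun p => PySem.List.mem_sorted I (fun p => p.1) false p
        have hs3 : ∀ p ∈ s, 0 ≤ p.1 ∧ p.1 ≤ p.2 := by
          intro p hp
          have := HB p ((hsmem p).mp hp)
          exact ⟨this.1, this.2.1⟩
        have hs4 : s.Pairwise (fun p q => p.1 ≤ q.1) := PySem.List.sorted_pairwise I (fun p => p.1)
        obtain ⟨P1, _, P3⟩ := merge_inv s (-1) [] (by simp) (by simp) hs3 hs4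
          (by intro p hp x hp1 hx
              exfalso
              have := (hs3 p hp).1
              omega)
        set out := (s.foldl bMergeStep (-1, [])).2 with hout
        have houtmem : ∀ x : Int, x ∈ out ↔ ∃ p ∈ I, p.1 ≤ x ∧ x ≤ p.2 := by
          intro x
          rw [hout, P3 x]
          simp only [List.not_mem_nil, false_or]
          constructor
          · rintro ⟨p, hp, h1, h2⟩; exact ⟨p, (hsmem p).mp hp, h1, h2⟩
          · rintro ⟨p, hp, h1, h2⟩; exact ⟨p, (hsmem p).mpr hp, h1, h2⟩
        have hnodup : out.Nodup := P1.imp (fun h => ne_of_lt h)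
        have hperm : out.Perm (PySem.Set.ofList (A.filter (fun a => decide (0 ≤ a ∧ a < mc)))) := by
          rw [List.perm_ext_iff_of_nodup hnodup (PySem.Set.nodup_ofList _)]
          intro x
          rw [houtmem x, PySem.Set.mem_ofList, hmemf x]
        have hres : PySem.List.sorted
            (PySem.Set.ofList (A.filter (fun a => decide (0 ≤ a ∧ a < mc)))) (fun x => x) false = out :=
          PySem.List.sorted_eq_of_perm_of_pairwise_lt _ _ (fun x => x) hperm P1
        rw [hres]
        have hiff : out = [] ↔ I = [] := by
          constructor
          · intro h
            rcases hI' : I with _ | ⟨p, t⟩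
            · rfl
            · exfalso
              have hpmem : p ∈ I := by rw [hI']; exact List.mem_cons_self ..
              have hp := HB p hpmem
              have hmem : p.1 ∈ out := (houtmem p.1).mpr ⟨p, hpmem, le_refl _, hp.2.1⟩
              rw [h] at hmem
              exact List.not_mem_nil hmem
          · intro h
            rw [List.eq_nil_iff_forall_not_mem]
            intro x hx
            obtain ⟨p, hp, _⟩ := (houtmem x).mp hx
            rw [h] at hp
            exact List.not_mem_nil hp
        split_ifs with ho hi hi
        · rfl
        · exact absurd (hiff.mp ho) hi
        · exact absurd (hiff.mpr hi) ho
        · rfl
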